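-- pv_equiv track=rewrite | github.com/sbuckley1956/agent-lifecycle-toolkit | altk/pre_tool/refraction/src/mappings/compute_maps.py | split_variable_name
-- ===== SOURCE A (Python) =====
-- from typing import List, Dict
--
-- def split_camel_case(text: str) -> List[str]:
--     words: List[str] = []
--     current_word = ""
--
--     for i, char in enumerate(text):
--         if char.isupper() and i != 0:
--             words.append(current_word)
--             current_word = char
--         else:
--             current_word += char
--
--     words.append(current_word)
--     return words
--
-- def split_variable_name(name: str) -> List[str]:
--     name_without_whitespace = name.replace(" ", "")
--     name_split_with_underscore = name_without_whitespace.split("_")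
--
--     split_the_dots: List[str] = []
--     for item in name_split_with_underscore:
--         tmp_split = item.split(".")
--         split_the_dots.extend(tmp_split)
--
--     new_split: List[str] = []
--     for item in split_the_dots:
--         de_camel_words = split_camel_case(item)
--         new_split.extend(de_camel_words)
--
--     return new_split
-- ===== SOURCE B (Python) =====
-- def split_variable_name(name):
--     words = []
--     current = ""
--     seg_start = True
--     for ch in name:
--         if ch == ' ':
--             continue
--         if ch == '_' or ch == '.':
--             words.append(current)
--             current = ""
--             seg_start = True
--         elif ch.isupper() and not seg_start:
--             words.append(current)
--             current = ch
--             seg_start = False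
--         else:
--             current += ch
--             seg_start = False
--     words.append(current)
--     return words
-- ===== Notes on version B (the rewrite author's own statement) =====
-- stated objective: simpler
-- what changed: Replaces the four-stage pipeline (strip spaces, split on '_', split each piece on '.', camel-split each piece with a helper) by one stateful scan over the characters maintaining words/current/seg_start, inlining the camelCase helper.
import Mathlib
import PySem

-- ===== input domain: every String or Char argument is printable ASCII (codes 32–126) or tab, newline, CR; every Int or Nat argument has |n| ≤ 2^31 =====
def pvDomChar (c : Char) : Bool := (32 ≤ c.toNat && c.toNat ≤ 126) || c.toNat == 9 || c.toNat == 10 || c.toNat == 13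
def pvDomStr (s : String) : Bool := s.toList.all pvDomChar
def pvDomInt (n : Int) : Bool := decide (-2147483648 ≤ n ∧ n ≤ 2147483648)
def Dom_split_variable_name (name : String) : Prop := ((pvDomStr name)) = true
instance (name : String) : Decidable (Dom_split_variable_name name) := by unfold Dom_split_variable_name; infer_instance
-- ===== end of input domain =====

-- B replaces A's four-stage pipeline (remove spaces, split on '_', split on '.', camel-split)
-- by a single stateful scan over the characters; same return value, objective: simpler.

-- ===== PORT A =====
-- port of A's helper split_camel_case (on the char list of the string)
def pvCamelA (text : List Char) : List (List Char) :=
  let r := (PySem.List.enumerate text 0).foldl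
    (fun (st : List (List Char) × List Char) ic =>
      if PySem.Chars.isupper ic.2 && (ic.1 != 0) then (st.1 ++ [st.2], [ic.2])
      else (st.1, st.2 ++ [ic.2])) ([], [])
  r.1 ++ [r.2]

def split_variable_name (name : String) : List String :=
  let nameWithoutWhitespace := PySem.Chars.replace name.toList " ".toList "".toList
  let nameSplitWithUnderscore := PySem.Chars.splitOn nameWithoutWhitespace "_".toList
  let splitTheDots := nameSplitWithUnderscore.foldl
    (fun acc item => acc ++ PySem.Chars.splitOn item ".".toList) []
  let newSplit := splitTheDots.foldl (fun acc item => acc ++ pvCamelA item) []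
  newSplit.map String.ofList

-- ===== PORT B =====
-- the single-pass loop of Source B: state (words, current, seg_start)
def pvAltGo : List Char → List (List Char) → List Char → Bool → List (List Char)
  | [], words, cur, _ => words ++ [cur]
  | c :: rest, words, cur, segStart =>
    if c == ' ' then pvAltGo rest words cur segStart
    else if c == '_' || c == '.' then pvAltGo rest (words ++ [cur]) [] true
    else if PySem.Chars.isupper c && !segStart then pvAltGo rest (words ++ [cur]) [c] false
    else pvAltGo rest words (cur ++ [c]) false

def split_variable_name_alt (name : String) : List String :=
  (pvAltGo name.toList [] [] true).map String.ofList

-- ===== PRECONDITION & SPEC =====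
def Spec_split_variable_name (name : String) (out : List String) : Prop := out = split_variable_name_alt name
instance (name : String) (out : List String) : Decidable (Spec_split_variable_name name out) := by unfold Spec_split_variable_name; infer_instance

-- ===== CLAIM (what is proved, stated in full; the proofs are below) =====
def Claim_equal_split_variable_name : Prop := ∀ (name : String), Dom_split_variable_name name → Spec_split_variable_name name (split_variable_name name)

-- ===== LEMMAS AND PROOFS =====

-- splitting on one delimiter character, in structural form
def mySplit (d : Char) : List Char → List (List Char)
  | [] => [[]]
  | c :: t => if c == d then [] :: mySplit d t
              else (c :: (mySplit d t).headI) :: (mySplit d t).tail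

-- splitting on both delimiters at once
def splitD : List Char → List (List Char)
  | [] => [[]]
  | c :: cs => if c == '_' || c == '.' then [] :: splitD cs
               else (c :: (splitD cs).headI) :: (splitD cs).tail

-- camel splitting of a segment, in structural form (cur = current word)
def camelGo : List Char → List Char → List (List Char)
  | [], cur => [cur]
  | c :: cs, cur => if PySem.Chars.isupper c then cur :: camelGo cs [c] else camelGo cs (cur ++ [c])

def camel : List Char → List (List Char)
  | [] => [[]]
  | c :: cs => camelGo cs [c]

theorem mySplit_ne_nil (d : Char) (l : List Char) : mySplit d l ≠ [] := by
  cases l with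
  | nil => simp [mySplit]
  | cons c t => simp only [mySplit]; split <;> simp

theorem splitD_ne_nil (l : List Char) : splitD l ≠ [] := by
  cases l with
  | nil => simp [splitD]
  | cons c t => simp only [splitD]; split <;> simp

-- A's name.replace(" ", "") is the space filter
theorem rep_go (l acc : List Char) (fuel : Nat) (h : l.length ≤ fuel) :
    PySem.Chars.replace.go [' '] [] fuel l acc = acc.reverse ++ l.filter (fun c => c != ' ') := by
  induction fuel generalizing l acc with
  | zero => cases l with
    | nil => simp [PySem.Chars.replace.go]
    | cons c t => simp at h
  | succ n ih =>
    cases l with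
    | nil => simp [PySem.Chars.replace.go]
    | cons c t =>
      rw [PySem.Chars.replace.go]
      by_cases hc : c = ' '
      · subst hc
        simp [List.isPrefixOf, ih t acc (by simpa using Nat.le_of_succ_le_succ h)]
      · simp [List.isPrefixOf, hc, ih t (c::acc) (by simpa using Nat.le_of_succ_le_succ h),
          Ne.symm hc]

theorem rep_filter (s : List Char) :
    PySem.Chars.replace s [' '] [] = s.filter (fun c => c != ' ') := by
  rw [PySem.Chars.replace]
  simp [rep_go s [] s.length le_rfl]

-- A's .split(d) for a one-character separator is mySplit
theorem split_go (d : Char) (l cur : List Char) (acc : List (List Char)) (fuel : Nat)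
    (h : l.length ≤ fuel) :
    PySem.Chars.splitOn.go [d] fuel l cur acc =
      acc.reverse ++ (cur.reverse ++ (mySplit d l).headI) :: (mySplit d l).tail := by
  induction fuel generalizing l cur acc with
  | zero => cases l with
    | nil => simp [PySem.Chars.splitOn.go, mySplit]
    | cons c t => simp at h
  | succ n ih =>
    cases l with
    | nil => simp [PySem.Chars.splitOn.go, mySplit]
    | cons c t =>
      rw [PySem.Chars.splitOn.go]
      by_cases hc : c = d
      · subst hc
        rw [if_pos (by simp [List.isPrefixOf])]
        simp only [List.length_cons, List.length_nil, Nat.zero_add, List.drop_succ_cons,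
          List.drop_zero]
        rw [ih t [] (cur.reverse :: acc) (by simpa using Nat.le_of_succ_le_succ h)]
        cases hm : mySplit c t with
        | nil => exact absurd hm (mySplit_ne_nil c t)
        | cons a b => simp [mySplit, hm]
      · rw [if_neg (by simp [List.isPrefixOf]; exact Ne.symm hc)]
        rw [ih t (c :: cur) acc (by simpa using Nat.le_of_succ_le_succ h)]
        simp [mySplit, hc]

theorem splitOn_single (d : Char) (s : List Char) :
    PySem.Chars.splitOn s [d] = mySplit d s := by
  rw [PySem.Chars.splitOn, split_go d s [] [] (s.length + 1) (by omega)]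
  cases hm : mySplit d s with
  | nil => exact absurd hm (mySplit_ne_nil d s)
  | cons a b => simp

-- splitting on '_' then on '.' is splitting on both delimiters at once
theorem twoStage (cs : List Char) :
    (mySplit '_' cs).flatMap (mySplit '.') = splitD cs := by
  induction cs with
  | nil => simp [mySplit, splitD]
  | cons c cs ih =>
    by_cases hu : c = '_'
    · subst hu
      simp [mySplit, splitD, ih]
    · by_cases hd : c = '.'
      · subst hd
        cases hm : mySplit '_' cs with
        | nil => exact absurd hm (mySplit_ne_nil _ _)
        | cons h0 t0 =>
          rw [hm] at ih
          simp [mySplit, splitD, hm, ← ih]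
      · cases hm : mySplit '_' cs with
        | nil => exact absurd hm (mySplit_ne_nil _ _)
        | cons h0 t0 =>
          rw [hm] at ih
          cases hm2 : mySplit '.' h0 with
          | nil => exact absurd hm2 (mySplit_ne_nil _ _)
          | cons h1 t1 =>
            have ih' : splitD cs = h1 :: (t1 ++ t0.flatMap (mySplit '.')) := by
              rw [← ih]; simp [List.flatMap_cons, hm2]
            simp [mySplit, splitD, hm, hm2, hu, hd, ih', List.flatMap_cons]

-- A's enumerate fold, once past index 0, is camelGo
theorem camelA_go (cs : List Char) : ∀ (i : Int), 1 ≤ i → ∀ (ws : List (List Char)) (cur : List Char),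
    (((PySem.List.enumerate cs i).foldl
      (fun (st : List (List Char) × List Char) ic =>
        if PySem.Chars.isupper ic.2 && (ic.1 != 0) then (st.1 ++ [st.2], [ic.2])
        else (st.1, st.2 ++ [ic.2])) (ws, cur)).1) ++
    [(((PySem.List.enumerate cs i).foldl
      (fun (st : List (List Char) × List Char) ic =>
        if PySem.Chars.isupper ic.2 && (ic.1 != 0) then (st.1 ++ [st.2], [ic.2])
        else (st.1, st.2 ++ [ic.2])) (ws, cur)).2)] = ws ++ camelGo cs cur := by
  induction cs with
  | nil => intro i hi ws cur; simp [PySem.List.enumerate_nil, camelGo]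
  | cons c rest ih =>
    intro i hi ws cur
    rw [PySem.List.enumerate_cons]
    have hne : i ≠ 0 := by omega
    simp only [List.foldl_cons]
    by_cases hu : PySem.Chars.isupper c = true
    · rw [show (if (PySem.Chars.isupper c && (i != 0)) = true then (ws ++ [cur], [c])
            else (ws, cur ++ [c])) = (ws ++ [cur], [c]) by simp [hu, hne]]
      rw [ih (i+1) (by omega) (ws ++ [cur]) [c]]
      simp [camelGo, hu]
    · rw [show (if (PySem.Chars.isupper c && (i != 0)) = true then (ws ++ [cur], [c])
            else (ws, cur ++ [c])) = (ws, cur ++ [c]) by simp [hu]]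
      rw [ih (i+1) (by omega) ws (cur ++ [c])]
      simp [camelGo, hu]

theorem camelA_eq (text : List Char) : pvCamelA text = camel text := by
  cases text with
  | nil => rfl
  | cons c cs =>
    unfold pvCamelA
    rw [PySem.List.enumerate_cons]
    simp only [List.foldl_cons]
    rw [show (if (PySem.Chars.isupper c && ((0:Int) != 0)) = true
          then (([] : List (List Char)) ++ [([] : List Char)], [c])
          else (([] : List (List Char)), ([] : List Char) ++ [c])) = ([], [c]) by simp]
    simp only [zero_add]
    rw [camelA_go cs 1 (by omega) [] [c]]
    simp [camel]

-- accumulated words just prepend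
theorem alt_append (cs : List Char) (words : List (List Char)) (cur : List Char) (sst : Bool) :
    pvAltGo cs words cur sst = words ++ pvAltGo cs [] cur sst := by
  induction cs generalizing words cur sst with
  | nil => simp [pvAltGo]
  | cons c rest ih =>
    simp only [pvAltGo, List.nil_append]
    split_ifs
    · exact ih words cur sst
    · rw [ih (words ++ [cur]) [] true, ih [cur] [] true, List.append_assoc]
    · rw [ih (words ++ [cur]) [c] false, ih [cur] [c] false, List.append_assoc]
    · exact ih words (cur ++ [c]) false

-- the space branch only skips: spaces can be filtered out up front
theorem alt_filter (cs : List Char) (words : List (List Char)) (cur : List Char) (sst : Bool) :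
    pvAltGo cs words cur sst = pvAltGo (cs.filter (fun c => c != ' ')) words cur sst := by
  induction cs generalizing words cur sst with
  | nil => rfl
  | cons c rest ih =>
    by_cases hc : c = ' '
    · subst hc; simp [pvAltGo, ih]
    · simp only [List.filter_cons, bne_iff_ne, ne_eq, hc, not_false_eq_true,
        if_true, pvAltGo]
      rw [show (c == ' ') = false by simp [hc]]
      simp only [Bool.false_eq_true, if_false]
      split_ifs <;> exact ih _ _ _

-- on space-free input the scan computes the camel-split of the delimiter segments
theorem alt_main (cs : List Char) (hns : ∀ c ∈ cs, c ≠ ' ') :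
    (∀ cur, pvAltGo cs [] cur false =
        camelGo (splitD cs).headI cur ++ (splitD cs).tail.flatMap camel)
    ∧ pvAltGo cs [] [] true = (splitD cs).flatMap camel := by
  induction cs with
  | nil => exact ⟨fun cur => by simp [pvAltGo, splitD, camelGo], by simp [pvAltGo, splitD, camel]⟩
  | cons c rest ih =>
    have hc : (c == ' ') = false := by simpa using hns c (by simp)
    obtain ⟨ihA, ihB⟩ := ih (fun x h => hns x (List.mem_cons_of_mem _ h))
    by_cases hd : (c == '_' || c == '.') = true
    · have hsplit : splitD (c :: rest) = [] :: splitD rest := by simp [splitD, hd]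
      constructor
      · intro cur
        simp only [pvAltGo, hc, Bool.false_eq_true, if_false, hd, if_true, List.nil_append]
        rw [alt_append rest [cur] [] true, ihB, hsplit]
        simp [camelGo]
      · simp only [pvAltGo, hc, Bool.false_eq_true, if_false, hd, if_true, List.nil_append]
        rw [alt_append rest [[]] [] true, ihB, hsplit]
        simp [camel]
    · have hd' : (c == '_' || c == '.') = false := by simpa using hd
      cases hsp : splitD rest with
      | nil => exact absurd hsp (splitD_ne_nil rest)
      | cons h t =>
        rw [hsp] at ihA ihB
        have hsplit : splitD (c :: rest) = (c :: h) :: t := by simp [splitD, hd', hsp]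
        by_cases hu : PySem.Chars.isupper c = true
        · constructor
          · intro cur
            simp only [pvAltGo, hc, Bool.false_eq_true, if_false, hd', hu, Bool.not_false,
              Bool.and_true, if_true, List.nil_append]
            rw [alt_append rest [cur] [c] false, ihA [c], hsplit]
            simp [camelGo, hu]
          · simp only [pvAltGo, hc, Bool.false_eq_true, if_false, hd', hu, Bool.not_true,
              Bool.and_false, List.nil_append]
            rw [ihA [c], hsplit]
            simp [camel]
        · have hu' : PySem.Chars.isupper c = false := by simpa using hu
          constructor
          · intro cur
            simp only [pvAltGo, hc, Bool.false_eq_true, if_false, hd', hu', Bool.not_false,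
              Bool.and_true, List.nil_append]
            rw [ihA (cur ++ [c]), hsplit]
            simp [camelGo, hu']
          · simp only [pvAltGo, hc, Bool.false_eq_true, if_false, hd', hu', Bool.not_true,
              Bool.and_false, List.nil_append]
            rw [ihA [c], hsplit]
            simp [camel]

-- ===== VERDICT (by name: the statement is the Claim_ definition above) =====
theorem split_variable_name_spec : Claim_equal_split_variable_name := by
  unfold Claim_equal_split_variable_name
  intro name _
  unfold Spec_split_variable_name split_variable_name split_variable_name_alt
  rw [show " ".toList = [' '] from rfl, show "_".toList = ['_'] from rfl,
    show ".".toList = ['.'] from rfl, show "".toList = ([] : List Char) from rfl]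
  simp only [rep_filter, splitOn_single, PySem.List.foldl_append_eq_flatMap, List.nil_append,
    camelA_eq]
  rw [twoStage]
  rw [alt_filter name.toList [] [] true]
  have hns : ∀ c ∈ name.toList.filter (fun c => c != ' '), c ≠ ' ' := by
    intro c hcx
    simp only [List.mem_filter, bne_iff_ne, ne_eq] at hcx
    exact hcx.2
  rw [(alt_main _ hns).2]
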